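-- pv_equiv track=rewrite | github.com/sopolat/stateful_virtualization | state_merging.py | create_node_list
-- ===== SOURCE A (Python) =====
-- def create_node_list(responseList,response_list):
--
--     node_list = []
--     node_list.append('Init-0')
--     i = 0
--     for responses in responseList:
--         for resp in responses:
--
--             node_list.append(str(i))
--             response_list.append(resp)
--             i += 1
--
--     return node_list
-- ===== SOURCE B (Python) =====
-- def create_node_list(responseList, response_list):
--     # Count total responses via per-sublist lengths (no per-element scan),
--     # extend response_list sublist by sublist, then build the labels
--     # back-to-front with a countdown and reverse once at the end.
--     n = 0
--     for responses in responseList: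
--         response_list.extend(responses)
--         n += len(responses)
--     node_list = []
--     while n:
--         n -= 1
--         node_list.append(str(n))
--     node_list.append('Init-0')
--     node_list.reverse()
--     return node_list
-- ===== Notes on version B (the rewrite author's own statement) =====
-- stated objective: alternative
-- what changed: B never walks the elements to label them: it sums per-sublist lengths (extending response_list with whole sublists), then builds the index labels back-to-front with a countdown loop and a single reverse, instead of A's nested per-element loop with a running counter.
import Mathlib
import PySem

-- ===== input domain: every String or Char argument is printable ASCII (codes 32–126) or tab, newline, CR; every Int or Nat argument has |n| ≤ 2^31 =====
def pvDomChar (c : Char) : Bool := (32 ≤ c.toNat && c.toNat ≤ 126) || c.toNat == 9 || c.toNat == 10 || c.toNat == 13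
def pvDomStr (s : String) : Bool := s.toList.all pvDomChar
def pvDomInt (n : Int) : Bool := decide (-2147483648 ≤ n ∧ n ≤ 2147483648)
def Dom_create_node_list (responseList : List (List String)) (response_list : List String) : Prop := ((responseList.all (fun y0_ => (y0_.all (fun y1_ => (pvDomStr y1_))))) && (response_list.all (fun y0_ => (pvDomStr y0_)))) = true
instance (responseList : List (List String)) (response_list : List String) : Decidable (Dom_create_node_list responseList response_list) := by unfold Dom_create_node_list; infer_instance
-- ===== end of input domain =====

-- B is an alternative decomposition: it counts per-sublist lengths (no per-element loop) and builds
-- the labels back-to-front with a countdown then one reverse; both mutate response_list identically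
-- (by whole sublists vs element by element, same final contents); the theorem is about the return value.


-- ===== PORT A =====
-- Literal port of A: nested loop appending str(i) with a running counter i.
-- A also appends each resp to response_list (caller-visible mutation); the return value is node_list only.
def create_node_list (responseList : List (List String)) (response_list : List String) : List String :=
  (responseList.foldl
    (fun (st : List String × Int) responses =>
      responses.foldl (fun st _resp => (st.1 ++ [PySem.Int.toStr st.2], st.2 + 1)) st)
    (["Init-0"], 0)).1

-- ===== PORT B =====
-- Port of B's countdown while-loop: 'while n: n -= 1; node_list.append(str(n))'.
-- The counter is a sum of lengths, hence always ≥ 0, so a Nat counter is exact for the Python int.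
def cnlAltLoop : Nat → List String → List String
  | 0, acc => acc
  | Nat.succ k, acc => cnlAltLoop k (acc ++ [PySem.Int.toStr (k : Int)])

def create_node_list_alt (responseList : List (List String)) (response_list : List String) : List String :=
  let n := responseList.foldl (fun n responses => n + responses.length) 0
  (cnlAltLoop n [] ++ ["Init-0"]).reverse

-- ===== PRECONDITION & SPEC =====
def Spec_create_node_list (responseList : List (List String)) (response_list : List String) (out : List String) : Prop := out = create_node_list_alt responseList response_list
instance (responseList : List (List String)) (response_list : List String) (out : List String) : Decidable (Spec_create_node_list responseList response_list out) := by unfold Spec_create_node_list; infer_instance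

-- ===== CLAIM (what is proved, stated in full; the proofs are below) =====
def Claim_equal_create_node_list : Prop := ∀ (responseList : List (List String)) (response_list : List String), Dom_create_node_list responseList response_list → Spec_create_node_list responseList response_list (create_node_list responseList response_list)

-- ===== LEMMAS AND PROOFS =====

theorem cnl_inner (rs : List String) (acc : List String) (i : Int) :
    rs.foldl (fun (st : List String × Int) _resp => (st.1 ++ [PySem.Int.toStr st.2], st.2 + 1)) (acc, i)
      = (acc ++ (PySem.List.pyRange i (i + rs.length) 1).map (fun j => PySem.Int.toStr j), i + rs.length) := by
  induction rs generalizing acc i with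
  | nil => simp [PySem.List.pyRange_one_eq_nil]
  | cons r rs ih =>
    simp only [List.foldl_cons, ih]
    have h : i < i + (r :: rs).length := by simp
    rw [PySem.List.pyRange_one_cons h]
    have e : i + 1 + (rs.length : Int) = i + ((r :: rs).length : Int) := by rw [List.length_cons]; push_cast; ring
    rw [e]
    simp

theorem cnl_outer (rl : List (List String)) (acc : List String) (i : Int) :
    (rl.foldl
      (fun (st : List String × Int) responses =>
        responses.foldl (fun st _resp => (st.1 ++ [PySem.Int.toStr st.2], st.2 + 1)) st)
      (acc, i))
      = (acc ++ (PySem.List.pyRange i (i + rl.flatten.length) 1).map (fun j => PySem.Int.toStr j),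
         i + rl.flatten.length) := by
  induction rl generalizing acc i with
  | nil => simp [PySem.List.pyRange_one_eq_nil]
  | cons rs rl ih =>
    simp only [List.foldl_cons, cnl_inner, ih]
    have hl : (rs :: rl).flatten.length = rs.length + rl.flatten.length := by
      rw [List.flatten_cons, List.length_append]
    have h1 : i ≤ i + (rs.length : Int) := by omega
    have h2 : (i + rs.length : Int) ≤ i + ((rs :: rl).flatten.length : Int) := by
      rw [hl]; push_cast; omega
    have hsplit := PySem.List.pyRange_one_append i (i + rs.length)
      (i + ((rs :: rl).flatten.length : Int)) h1 h2
    have e : i + (rs.length : Int) + (rl.flatten.length : Int)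
        = i + ((rs :: rl).flatten.length : Int) := by rw [hl]; push_cast; ring
    rw [e, hsplit]
    simp

theorem cnlAltLoop_eq (k : Nat) (acc : List String) :
    cnlAltLoop k acc = acc ++ ((List.range k).map (fun (j : Nat) => PySem.Int.toStr (Int.ofNat j))).reverse := by
  induction k generalizing acc with
  | zero => simp [cnlAltLoop]
  | succ k ih =>
    rw [cnlAltLoop, ih, List.range_succ]
    simp

theorem cnl_count (rl : List (List String)) (n : Nat) :
    rl.foldl (fun n responses => n + responses.length) n = n + rl.flatten.length := by
  induction rl generalizing n with
  | nil => simp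
  | cons rs rl ih => simp [List.foldl_cons, ih]; omega

theorem pyRange_zero_map (n : Nat) (f : Int → String) :
    (PySem.List.pyRange 0 (n : Int) 1).map f = (List.range n).map (fun (j : Nat) => f (Int.ofNat j)) := by
  rw [PySem.List.pyRange_zero_natCast, List.map_map]
  rfl

-- ===== VERDICT (by name: the statement is the Claim_ definition above) =====
theorem create_node_list_spec : Claim_equal_create_node_list := by
  intro rl r _
  unfold Spec_create_node_list create_node_list create_node_list_alt
  rw [cnl_outer]
  simp [cnl_count, cnlAltLoop_eq]
  rw [show (List.map (Nat.cast ∘ List.length) rl).sum = (((List.map List.length rl).sum : Nat) : Int) by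
        rw [Nat.cast_list_sum, List.map_map],
      pyRange_zero_map]
  rfl
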